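-- pv_equiv track=rewrite | github.com/NamVai/Music-Transformer-vs-Base-Transformer-for-symbolic-music-modelling | data/maestro.py | _encode_onset_sequence
-- ===== SOURCE A (Python) =====
-- from typing import Dict, List, Tuple
--
-- def _encode_onset_sequence(
--     onsets: Dict[int, List[int]],
--     note_on_base: int,
--     time_shift_id: int,
--     bar_id: int,
--     phrase_id: int,
--     min_midi: int,
--     max_midi: int,
--     bar_every: int = 16,
--     phrase_every_bars: int = 4,
-- ) -> List[int]:
--     """Encode onset steps into a note-on/time-shift token sequence."""
--     if not onsets:
--         return []
--     max_step = max(onsets.keys())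
--     tokens: List[int] = []
--     for i in range(max_step + 1):
--         if bar_every > 0 and i % bar_every == 0:
--             tokens.append(bar_id)
--             if phrase_every_bars > 0 and (i // bar_every) % phrase_every_bars == 0:
--                 tokens.append(phrase_id)
--         pitches = sorted(onsets.get(i, []))
--         for pitch in pitches:
--             pitch = max(min_midi, min(max_midi, pitch))
--             tokens.append(note_on_base + (pitch - min_midi))
--         tokens.append(time_shift_id)
--     return tokens
-- ===== SOURCE B (Python) =====
-- def _encode_onset_sequence(
--     onsets,
--     note_on_base,
--     time_shift_id,
--     bar_id,
--     phrase_id,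
--     min_midi,
--     max_midi,
--     bar_every=16,
--     phrase_every_bars=4,
-- ):
--     """Bar-structured encoder: outer loop over bars, inner loop over the
--     steps of each bar (partial last bar via min); headers computed once per
--     bar from the bar index instead of re-deriving them from each step."""
--     if not onsets:
--         return []
--     max_step = max(onsets)
--
--     def step_toks(i):
--         return [note_on_base + (max(min_midi, min(max_midi, p)) - min_midi)
--                 for p in sorted(onsets.get(i, []))] + [time_shift_id]
--
--     if bar_every <= 0:
--         return [t for i in range(max_step + 1) for t in step_toks(i)]
--
--     out = []
--     for b in range(max_step // bar_every + 1):
--         out.append(bar_id)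
--         if phrase_every_bars > 0 and b % phrase_every_bars == 0:
--             out.append(phrase_id)
--         for i in range(b * bar_every, min((b + 1) * bar_every, max_step + 1)):
--             out += step_toks(i)
--     return out
-- ===== Notes on version B (the rewrite author's own statement) =====
-- stated objective: alternative
-- what changed: The single flat loop over steps (re-deriving bar/phrase headers from each step index by % and //) is restructured into an outer loop over bars and an inner loop over the steps of each bar, with headers computed once per bar from the bar index and the partial last bar handled by min; bar_every<=0 keeps a plain header-free step loop.
import Mathlib
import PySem

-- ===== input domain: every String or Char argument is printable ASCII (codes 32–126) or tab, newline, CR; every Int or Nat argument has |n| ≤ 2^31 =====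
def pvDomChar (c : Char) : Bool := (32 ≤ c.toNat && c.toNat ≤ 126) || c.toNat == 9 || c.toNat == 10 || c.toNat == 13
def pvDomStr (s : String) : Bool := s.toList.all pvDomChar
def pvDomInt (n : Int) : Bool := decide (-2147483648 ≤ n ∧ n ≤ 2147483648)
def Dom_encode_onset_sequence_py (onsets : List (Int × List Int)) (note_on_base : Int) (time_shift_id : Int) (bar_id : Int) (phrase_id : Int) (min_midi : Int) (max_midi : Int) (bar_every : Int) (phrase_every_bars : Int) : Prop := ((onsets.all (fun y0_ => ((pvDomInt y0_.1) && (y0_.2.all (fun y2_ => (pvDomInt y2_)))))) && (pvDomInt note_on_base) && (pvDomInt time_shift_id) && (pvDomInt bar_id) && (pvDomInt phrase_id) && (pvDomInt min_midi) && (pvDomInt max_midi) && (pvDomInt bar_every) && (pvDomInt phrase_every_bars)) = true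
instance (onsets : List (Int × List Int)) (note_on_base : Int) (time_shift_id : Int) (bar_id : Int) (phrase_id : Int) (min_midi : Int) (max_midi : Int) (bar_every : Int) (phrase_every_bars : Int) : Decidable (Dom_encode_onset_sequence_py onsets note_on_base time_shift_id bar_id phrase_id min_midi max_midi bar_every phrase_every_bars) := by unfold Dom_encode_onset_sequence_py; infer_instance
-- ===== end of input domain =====

-- B restructures A's single flat step loop into an outer loop over bars with per-bar headers and an inner
-- loop over the bar's steps (alternative decomposition, same cost); proved equal on all inputs.


-- ===== PORT A =====
-- literal port of A: one flat loop over steps 0..max_step, appending into `tokens`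
def encode_onset_sequence_py (onsets : List (Int × List Int)) (note_on_base : Int) (time_shift_id : Int) (bar_id : Int) (phrase_id : Int) (min_midi : Int) (max_midi : Int) (bar_every : Int) (phrase_every_bars : Int) : List Int :=
  if onsets = [] then []
  else
    match PySem.List.max? (PySem.Dict.keys (PySem.Dict.mk onsets)) (fun k => k) with
    | none => []
    | some max_step =>
      (PySem.List.pyRange 0 (max_step + 1) 1).foldl (fun tokens i =>
        let tokens :=
          if bar_every > 0 ∧ PySem.Int.mod i bar_every = 0 then
            let tokens := tokens ++ [bar_id]
            if phrase_every_bars > 0 ∧ PySem.Int.mod (PySem.Int.floordiv i bar_every) phrase_every_bars = 0 then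
              tokens ++ [phrase_id]
            else tokens
          else tokens
        let pitches := PySem.List.sorted (PySem.Dict.getD (PySem.Dict.mk onsets) i []) (fun p => p) false
        let tokens := pitches.foldl (fun acc pitch =>
          acc ++ [note_on_base + (max min_midi (min max_midi pitch) - min_midi)]) tokens
        tokens ++ [time_shift_id]) []

-- ===== PORT B =====
-- helper of B: tokens of one step (sorted clamped pitches, then the time shift)
def pvStepToks (onsets : List (Int × List Int)) (note_on_base : Int) (time_shift_id : Int) (min_midi : Int) (max_midi : Int) (i : Int) : List Int :=
  (PySem.List.sorted (PySem.Dict.getD (PySem.Dict.mk onsets) i []) (fun p => p) false).map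
    (fun p => note_on_base + (max min_midi (min max_midi p) - min_midi)) ++ [time_shift_id]

-- port of B: outer loop over bars, inner loop over the steps of the bar
def encode_onset_sequence_py_alt (onsets : List (Int × List Int)) (note_on_base : Int) (time_shift_id : Int) (bar_id : Int) (phrase_id : Int) (min_midi : Int) (max_midi : Int) (bar_every : Int) (phrase_every_bars : Int) : List Int :=
  if onsets = [] then []
  else
    match PySem.List.max? (PySem.Dict.keys (PySem.Dict.mk onsets)) (fun k => k) with
    | none => []
    | some max_step =>
      if bar_every ≤ 0 then
        (PySem.List.pyRange 0 (max_step + 1) 1).flatMap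
          (pvStepToks onsets note_on_base time_shift_id min_midi max_midi)
      else
        (PySem.List.pyRange 0 (PySem.Int.floordiv max_step bar_every + 1) 1).foldl (fun out b =>
          let out := out ++ [bar_id]
          let out :=
            if phrase_every_bars > 0 ∧ PySem.Int.mod b phrase_every_bars = 0 then out ++ [phrase_id]
            else out
          (PySem.List.pyRange (b * bar_every) (min ((b + 1) * bar_every) (max_step + 1)) 1).foldl
            (fun o i => o ++ pvStepToks onsets note_on_base time_shift_id min_midi max_midi i) out) []

-- ===== PRECONDITION & SPEC =====
def Spec_encode_onset_sequence_py (onsets : List (Int × List Int)) (note_on_base : Int) (time_shift_id : Int) (bar_id : Int) (phrase_id : Int) (min_midi : Int) (max_midi : Int) (bar_every : Int) (phrase_every_bars : Int) (out : List Int) : Prop := out = encode_onset_sequence_py_alt onsets note_on_base time_shift_id bar_id phrase_id min_midi max_midi bar_every phrase_every_bars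
instance (onsets : List (Int × List Int)) (note_on_base : Int) (time_shift_id : Int) (bar_id : Int) (phrase_id : Int) (min_midi : Int) (max_midi : Int) (bar_every : Int) (phrase_every_bars : Int) (out : List Int) : Decidable (Spec_encode_onset_sequence_py onsets note_on_base time_shift_id bar_id phrase_id min_midi max_midi bar_every phrase_every_bars out) := by unfold Spec_encode_onset_sequence_py; infer_instance

-- ===== CLAIM (what is proved, stated in full; the proofs are below) =====
def Claim_equal_encode_onset_sequence_py : Prop := ∀ (onsets : List (Int × List Int)) (note_on_base : Int) (time_shift_id : Int) (bar_id : Int) (phrase_id : Int) (min_midi : Int) (max_midi : Int) (bar_every : Int) (phrase_every_bars : Int), Dom_encode_onset_sequence_py onsets note_on_base time_shift_id bar_id phrase_id min_midi max_midi bar_every phrase_every_bars → Spec_encode_onset_sequence_py onsets note_on_base time_shift_id bar_id phrase_id min_midi max_midi bar_every phrase_every_bars (encode_onset_sequence_py onsets note_on_base time_shift_id bar_id phrase_id min_midi max_midi bar_every phrase_every_bars)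

-- ===== LEMMAS AND PROOFS =====

-- the per-bar header: bar token plus (maybe) phrase token
def pvHdr (bar_id phrase_id phrase_every_bars : Int) (b : Int) : List Int :=
  [bar_id] ++ (if phrase_every_bars > 0 ∧ PySem.Int.mod b phrase_every_bars = 0 then [phrase_id] else [])

-- what A appends for one step i
def pvFA (onsets : List (Int × List Int)) (note_on_base : Int) (time_shift_id : Int) (bar_id : Int) (phrase_id : Int) (min_midi : Int) (max_midi : Int) (bar_every : Int) (phrase_every_bars : Int) (i : Int) : List Int :=
  (if bar_every > 0 ∧ PySem.Int.mod i bar_every = 0 then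
     pvHdr bar_id phrase_id phrase_every_bars (PySem.Int.floordiv i bar_every)
   else []) ++ pvStepToks onsets note_on_base time_shift_id min_midi max_midi i

-- A's loop body appends pvFA, so A's loop is a flatMap
theorem pvA_flat (onsets : List (Int × List Int)) (note_on_base : Int) (time_shift_id : Int) (bar_id : Int) (phrase_id : Int) (min_midi : Int) (max_midi : Int) (bar_every : Int) (phrase_every_bars : Int) (l : List Int) (acc : List Int) :
    l.foldl (fun tokens i =>
      List.foldl (fun acc pitch => acc ++ [note_on_base + (max min_midi (min max_midi pitch) - min_midi)])
        (if bar_every > 0 ∧ PySem.Int.mod i bar_every = 0 then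
           if phrase_every_bars > 0 ∧ PySem.Int.mod (PySem.Int.floordiv i bar_every) phrase_every_bars = 0 then
             tokens ++ [bar_id] ++ [phrase_id]
           else tokens ++ [bar_id]
         else tokens)
        (PySem.List.sorted (PySem.Dict.getD (PySem.Dict.mk onsets) i []) (fun p => p) false)
      ++ [time_shift_id]) acc
    = acc ++ l.flatMap (pvFA onsets note_on_base time_shift_id bar_id phrase_id min_midi max_midi bar_every phrase_every_bars) := by
  rw [← PySem.List.foldl_append_eq_flatMap]
  apply PySem.List.foldl_congr_mem
  intro tokens i _
  simp only [PySem.List.foldl_append_singleton_eq_map, pvFA, pvHdr, pvStepToks]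
  split_ifs <;> simp [List.append_assoc]

-- B's bar-loop body appends header + chunk, so B's bar loop is a flatMap
theorem pvB_flat (onsets : List (Int × List Int)) (note_on_base : Int) (time_shift_id : Int) (bar_id : Int) (phrase_id : Int) (min_midi : Int) (max_midi : Int) (bar_every : Int) (phrase_every_bars : Int) (max_step : Int) (l : List Int) (acc : List Int) :
    l.foldl (fun out b =>
      List.foldl (fun o i => o ++ pvStepToks onsets note_on_base time_shift_id min_midi max_midi i)
        (if phrase_every_bars > 0 ∧ PySem.Int.mod b phrase_every_bars = 0 then
           out ++ [bar_id] ++ [phrase_id]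
         else out ++ [bar_id])
        (PySem.List.pyRange (b * bar_every) (min ((b + 1) * bar_every) (max_step + 1)) 1)) acc
    = acc ++ l.flatMap (fun b => pvHdr bar_id phrase_id phrase_every_bars b ++
        (PySem.List.pyRange (b * bar_every) (min ((b + 1) * bar_every) (max_step + 1)) 1).flatMap
          (pvStepToks onsets note_on_base time_shift_id min_midi max_midi)) := by
  rw [← PySem.List.foldl_append_eq_flatMap]
  apply PySem.List.foldl_congr_mem
  intro out b _
  rw [PySem.List.foldl_append_eq_flatMap]
  simp only [pvHdr]
  split_ifs <;> simp [List.append_assoc]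

-- one full-or-final bar: the flat step loop over [b*E, N) emits the header once (at i = b*E) then step tokens
theorem pvOneBar (hdr g : Int → List Int) (E : Int) (hE : 0 < E) (b N : Int) (h1 : b * E < N) (h2 : N ≤ b * E + E) :
    (PySem.List.pyRange (b * E) N 1).flatMap
      (fun i => (if PySem.Int.mod i E = 0 then hdr (PySem.Int.floordiv i E) else []) ++ g i)
    = hdr b ++ (PySem.List.pyRange (b * E) N 1).flatMap g := by
  rw [PySem.List.pyRange_one_cons h1, List.flatMap_cons, List.flatMap_cons]
  have hmod : PySem.Int.mod (b * E) E = 0 := by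
    rw [PySem.Int.mod_eq_zero_iff_dvd]; exact dvd_mul_left E b
  have hdiv : PySem.Int.floordiv (b * E) E = b := by
    rw [PySem.Int.floordiv_eq_iff_of_pos hE]
    exact ⟨le_refl _, by nlinarith⟩
  have htail : (PySem.List.pyRange (b * E + 1) N 1).flatMap
      (fun i => (if PySem.Int.mod i E = 0 then hdr (PySem.Int.floordiv i E) else []) ++ g i)
      = (PySem.List.pyRange (b * E + 1) N 1).flatMap g := by
    apply List.flatMap_congr
    intro i hi
    rw [PySem.List.mem_pyRange_one] at hi
    have hne : PySem.Int.mod i E ≠ 0 := by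
      intro h0
      rw [PySem.Int.mod_eq_zero_iff_dvd] at h0
      obtain ⟨k, hk⟩ := h0
      have hbk : b < k := by nlinarith
      have hkb : k < b + 1 := by nlinarith
      omega
    simp [hne]
  rw [htail, hmod, hdiv]
  simp [List.append_assoc]

-- splitting the flat step loop over [b0*E, N) into bars b0..(N-1)//E (partial last bar via min)
theorem pvCore (hdr g : Int → List Int) (E : Int) (hE : 0 < E) :
    ∀ (n : Nat) (b0 N : Int), b0 * E < N → (N - b0 * E).toNat ≤ n →
    (PySem.List.pyRange (b0 * E) N 1).flatMap
      (fun i => (if PySem.Int.mod i E = 0 then hdr (PySem.Int.floordiv i E) else []) ++ g i)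
    = (PySem.List.pyRange b0 (PySem.Int.floordiv (N - 1) E + 1) 1).flatMap
        (fun b => hdr b ++ (PySem.List.pyRange (b * E) (min ((b + 1) * E) N) 1).flatMap g) := by
  intro n
  induction n with
  | zero => intro b0 N h1 h2; omega
  | succ n ih =>
    intro b0 N h1 h2
    have hE1 : (b0 + 1) * E = b0 * E + E := by ring
    by_cases hle : N ≤ b0 * E + E
    · -- single (possibly partial) bar
      have hq : PySem.Int.floordiv (N - 1) E = b0 := by
        rw [PySem.Int.floordiv_eq_iff_of_pos hE]
        exact ⟨by omega, by rw [hE1]; omega⟩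
      rw [hq, PySem.List.pyRange_one_singleton, List.flatMap_cons, List.flatMap_nil]
      have hmin : min ((b0 + 1) * E) N = N := min_eq_right (by rw [hE1]; omega)
      rw [hmin, pvOneBar hdr g E hE b0 N h1 hle, List.append_nil]
    · -- full first bar, then recurse on the remaining bars
      rw [PySem.List.pyRange_one_append (b0 * E) (b0 * E + E) N (by omega) (by omega),
        List.flatMap_append, pvOneBar hdr g E hE b0 (b0 * E + E) (by omega) (le_refl _)]
      have hb0q : b0 < PySem.Int.floordiv (N - 1) E + 1 := by
        have := (PySem.Int.le_floordiv_iff_mul_le (a := N - 1) (b := E) (q := b0) hE).mpr (by omega)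
        omega
      rw [PySem.List.pyRange_one_cons hb0q, List.flatMap_cons]
      have hmin : min ((b0 + 1) * E) N = (b0 + 1) * E := min_eq_left (by rw [hE1]; omega)
      have hrest := ih (b0 + 1) N (by rw [hE1]; omega) (by rw [hE1]; omega)
      rw [hE1] at hrest
      rw [hmin, hE1, hrest, List.append_assoc]

-- the step loop over 0..max_step equals the bar loop over 0..max_step//E (any max_step, 0 < E)
theorem pvSplit (hdr g : Int → List Int) (E : Int) (hE : 0 < E) (M : Int) :
    (PySem.List.pyRange 0 (M + 1) 1).flatMap
      (fun i => (if PySem.Int.mod i E = 0 then hdr (PySem.Int.floordiv i E) else []) ++ g i)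
    = (PySem.List.pyRange 0 (PySem.Int.floordiv M E + 1) 1).flatMap
        (fun b => hdr b ++ (PySem.List.pyRange (b * E) (min ((b + 1) * E) (M + 1)) 1).flatMap g) := by
  by_cases hM : 0 ≤ M
  · have h := pvCore hdr g E hE (M + 1).toNat 0 (M + 1)
      (by rw [zero_mul]; omega) (by rw [zero_mul]; omega)
    rw [zero_mul] at h
    simpa using h
  · have hM' : M < 0 := by omega
    have hq : PySem.Int.floordiv M E < 0 := by
      rw [PySem.Int.floordiv_lt_iff_lt_mul hE, zero_mul]; omega
    rw [PySem.List.pyRange_one_eq_nil (by omega), PySem.List.pyRange_one_eq_nil (by omega)]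
    rfl

-- ===== VERDICT (by name: the statement is the Claim_ definition above) =====
theorem encode_onset_sequence_py_spec : Claim_equal_encode_onset_sequence_py := by
  intro onsets note_on_base time_shift_id bar_id phrase_id min_midi max_midi bar_every phrase_every_bars _
  unfold Spec_encode_onset_sequence_py
  unfold encode_onset_sequence_py encode_onset_sequence_py_alt
  by_cases hnil : onsets = []
  · simp [hnil]
  · rw [if_neg hnil, if_neg hnil]
    cases hM : PySem.List.max? (PySem.Dict.keys (PySem.Dict.mk onsets)) (fun k => k) with
    | none => rfl
    | some max_step =>
      dsimp only
      by_cases hE : bar_every ≤ 0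
      · rw [if_pos hE, pvA_flat, List.nil_append]
        apply List.flatMap_congr
        intro i _
        have hno : ¬ (bar_every > 0 ∧ PySem.Int.mod i bar_every = 0) := by
          rintro ⟨h, -⟩; omega
        simp [pvFA, hno]
      · rw [if_neg hE]
        have hE' : 0 < bar_every := by omega
        rw [pvA_flat, pvB_flat, List.nil_append, List.nil_append]
        rw [List.flatMap_congr (fun i _ => by
          simp [pvFA, hE'] :
          ∀ i ∈ PySem.List.pyRange 0 (max_step + 1) 1,
            pvFA onsets note_on_base time_shift_id bar_id phrase_id min_midi max_midi bar_every phrase_every_bars i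
            = (if PySem.Int.mod i bar_every = 0 then
                 pvHdr bar_id phrase_id phrase_every_bars (PySem.Int.floordiv i bar_every)
               else []) ++ pvStepToks onsets note_on_base time_shift_id min_midi max_midi i)]
        exact pvSplit (pvHdr bar_id phrase_id phrase_every_bars)
          (pvStepToks onsets note_on_base time_shift_id min_midi max_midi) bar_every hE' max_step
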